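-- pv_equiv track=rewrite | github.com/Antonios-Kagias/aida-thesis | code/server_test.py | rank_labels
-- ===== SOURCE A (Python) =====
-- def rank_labels(labels, instance_labels, placeholder = '-'):
--     # Create an array with placeholders
--     ranks = [placeholder] * len(labels)
--
--     # Dictionary to hold the rank positions of instance labels
--     label_positions = {label: pos+1 for pos, label in enumerate(instance_labels)}
--
--     # Fill the ranks array with the correct positions
--     for i in range(len(labels)):
--         label = labels[i]
--         if label in label_positions:
--             ranks[i] = label_positions[label]
--
--     return ranks
-- ===== SOURCE B (Python) =====
-- def rank_labels(labels, instance_labels, placeholder = '-'):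
--     # Inverted index: output slot(s) for each wanted label.  Then sweep the ranking
--     # backwards; the first hit for a label is its last occurrence, so each slot is
--     # written at most once (labels already handled are skipped via `seen`).
--     index = {}
--     for i, lab in enumerate(labels):
--         index.setdefault(lab, []).append(i)
--     ranks = [placeholder] * len(labels)
--     seen = set()
--     for pos, lab in reversed(list(enumerate(instance_labels))):
--         if lab not in seen:
--             seen.add(lab)
--             if lab in index:
--                 for i in index[lab]:
--                     ranks[i] = pos + 1
--     return ranks
-- ===== Notes on version B (the rewrite author's own statement) =====
-- stated objective: alternative
-- what changed: B replaces A's last-position dictionary over instance_labels plus a mutating index loop over labels by an inverted index from each wanted label to its output slots, then a single sweep over instance_labels that writes pos+1 into those slots, later positions overwriting earlier ones.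
-- outside the precondition, e.g. on rank_labels(['x'], [], '-'): A returns ['-'], B returns ['-']
import Mathlib
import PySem

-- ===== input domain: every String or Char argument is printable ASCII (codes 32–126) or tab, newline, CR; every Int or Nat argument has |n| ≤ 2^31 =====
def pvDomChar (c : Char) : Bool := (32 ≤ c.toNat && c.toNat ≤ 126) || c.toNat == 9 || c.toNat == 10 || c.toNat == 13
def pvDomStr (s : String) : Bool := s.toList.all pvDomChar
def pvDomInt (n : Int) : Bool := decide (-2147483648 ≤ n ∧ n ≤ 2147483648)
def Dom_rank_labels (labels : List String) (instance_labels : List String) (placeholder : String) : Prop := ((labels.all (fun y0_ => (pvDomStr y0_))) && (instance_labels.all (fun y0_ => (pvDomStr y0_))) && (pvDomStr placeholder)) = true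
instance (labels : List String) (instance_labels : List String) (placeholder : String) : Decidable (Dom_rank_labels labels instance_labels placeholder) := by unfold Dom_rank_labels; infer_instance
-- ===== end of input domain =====

-- B replaces A's last-position dictionary + index loop over labels by an inverted
-- index (wanted label -> output slots) and a single overwriting sweep over the
-- instance ranking; objective: alternative structure, same return value on Pre_.

-- ===== PORT A =====
-- Python's ranks cell holds the STRING placeholder until overwritten; Pre_ excludes
-- inputs where any such cell survives (the result would not be a List Int), so the
-- untouched cell is modelled by 0 here.
def rank_labels (labels : List String) (instance_labels : List String) (placeholder : String) : List Int :=
  let ranks : List Int := List.replicate labels.length 0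
  let label_positions : PySem.Dict String Int :=
    (PySem.List.enumerate instance_labels 0).foldl
      (fun d p => d.insert p.2 (p.1 + 1)) PySem.Dict.empty
  (PySem.List.pyRange 0 (labels.length : Int) 1).foldl
    (fun rs i =>
      let label := PySem.List.pyGetD labels i ""   -- labels[i]; i ∈ range(len(labels)) is always in range
      if label_positions.contains label then
        rs.set i.toNat (label_positions.getD label 0)
      else rs)
    ranks

-- ===== PORT B =====
def rank_labels_alt (labels : List String) (instance_labels : List String) (placeholder : String) : List Int :=
  let index : PySem.Dict String (List Int) :=          -- index.setdefault(lab, []).append(i) = modify with default []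
    (PySem.List.enumerate labels 0).foldl
      (fun d p => d.modify p.2 [] (· ++ [p.1])) PySem.Dict.empty
  let ranks : List Int := List.replicate labels.length 0   -- placeholder cells, modelled by 0 (see PORT A note)
  (((PySem.List.enumerate instance_labels 0).reverse).foldl   -- reversed(list(enumerate(instance_labels)))
    (fun st q =>
      if PySem.Set.contains st.1 q.2 then st               -- lab already seen: skip
      else
        let seen := PySem.Set.add st.1 q.2
        if index.contains q.2 then
          (seen, (index.getD q.2 []).foldl (fun rs i => rs.set i.toNat (q.1 + 1)) st.2)
        else (seen, st.2))
    ((PySem.Set.empty : PySem.Set String), ranks)).2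

-- ===== PRECONDITION & SPEC =====
-- Pre_ excludes inputs on which some label never occurs in instance_labels: there both
-- Pythons return a list still containing the STRING placeholder, which is not a value of
-- the declared type List Int (both Pythons agree there too).
def Pre_rank_labels (labels : List String) (instance_labels : List String) (placeholder : String) : Prop :=
  ∀ lab ∈ labels, lab ∈ instance_labels
instance (labels : List String) (instance_labels : List String) (placeholder : String) : Decidable (Pre_rank_labels labels instance_labels placeholder) := by unfold Pre_rank_labels; infer_instance

def pvWitness_rank_labels : List String × List String × String := (["a", "c"], ["b", "a", "c", "a"], "-")

def Spec_rank_labels (labels : List String) (instance_labels : List String) (placeholder : String) (out : List Int) : Prop := out = rank_labels_alt labels instance_labels placeholder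
instance (labels : List String) (instance_labels : List String) (placeholder : String) (out : List Int) : Decidable (Spec_rank_labels labels instance_labels placeholder out) := by unfold Spec_rank_labels; infer_instance

-- ===== CLAIM (what is proved, stated in full; the proofs are below) =====
def Claim_equal_rank_labels : Prop := ∀ (labels : List String) (instance_labels : List String) (placeholder : String), Dom_rank_labels labels instance_labels placeholder → Pre_rank_labels labels instance_labels placeholder → Spec_rank_labels labels instance_labels placeholder (rank_labels labels instance_labels placeholder)

-- ===== LEMMAS AND PROOFS =====

lemma dict_get_eq (l : List String) (s : Int) (d0 : PySem.Dict String Int) (lab : String) :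
    ((PySem.List.enumerate l s).foldl (fun d p => d.insert p.2 (p.1 + 1)) d0).get? lab =
      match PySem.List.index? l.reverse lab with
      | some r => some (s + ((l.length - 1 - r : Nat) : Int) + 1)
      | none => d0.get? lab := by
  induction l using List.reverseRecOn with
  | nil => simp [PySem.List.enumerate_nil, PySem.List.index?_eq_idxOf?]
  | append_singleton t x ih =>
    rw [PySem.List.enumerate_append, List.foldl_append]
    simp only [PySem.List.enumerate_cons, PySem.List.enumerate_nil, List.foldl_cons, List.foldl_nil]
    rw [List.reverse_append]
    simp only [List.reverse_cons, List.reverse_nil, List.nil_append, List.singleton_append]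
    by_cases hx : lab = x
    · subst hx
      rw [PySem.Dict.get?_insert_self]
      rw [PySem.List.index?_cons_self]
      simp
    · rw [PySem.Dict.get?_insert_of_ne _ _ hx, ih]
      rw [PySem.List.index?_cons_of_ne _ (Ne.symm hx)]
      cases hidx : PySem.List.index? t.reverse lab with
      | none => simp
      | some r =>
        simp only [Option.map_some]
        have : (t.length + 1 - 1 - (r + 1)) = (t.length - 1 - r) := by omega
        simp only [List.length_append, List.length_singleton]
        congr 1
        omega

-- pointwise: the cell A writes (0 if never written) equals B's comprehension body

lemma take_succ_set (l : List Int) (k : Nat) (v : Int) (h : k < l.length) :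
    (l.set k v).take (k + 1) = l.take k ++ [v] := by
  induction l generalizing k with
  | nil => simp at h
  | cons x t ih =>
    cases k with
    | zero => simp
    | succ k => simp [List.set, List.take, ih k (by simpa using h)]

-- A's index loop over range(len(labels)) with set-at-i, from a suffix of zeros, is a map

lemma loop_eq (labels : List String) (D : PySem.Dict String Int) :
    ∀ (k : Nat) (rs : List Int), rs.length = labels.length →
    (∀ j (hj : j < rs.length), k ≤ j → rs[j] = 0) →
    (PySem.List.pyRange (k : Int) (labels.length : Int) 1).foldl
      (fun rs i =>
        let label := PySem.List.pyGetD labels i ""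
        if D.contains label then rs.set i.toNat (D.getD label 0) else rs) rs
    = rs.take k ++ (labels.drop k).map (fun lab => if D.contains lab then D.getD lab 0 else 0) := by
  intro k
  induction hn : labels.length - k using Nat.strong_induction_on generalizing k with
  | _ n ih =>
  intro rs hlen hzero
  by_cases hk : k < labels.length
  · rw [PySem.List.pyRange_one_cons (by exact_mod_cast hk)]
    rw [List.foldl_cons]
    simp only []
    have hget : PySem.List.pyGetD labels (k : Int) "" = labels[k] := by
      rw [PySem.List.pyGetD_natCast]
      exact List.getD_eq_getElem labels "" hk
    have hdrop : labels.drop k = labels[k] :: labels.drop (k + 1) :=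
      (List.drop_eq_getElem_cons hk)
    have hcast : ((k : Int) + 1) = ((k + 1 : Nat) : Int) := by push_cast; ring
    by_cases hc : D.contains labels[k]
    · rw [hget, if_pos hc]
      have hset : ((k : Int)).toNat = k := by simp
      rw [hset, hcast,
        ih (labels.length - (k+1)) (by omega) (k+1) rfl (rs.set k (D.getD labels[k] 0))
          (by simpa using hlen)
          (by intro j hj hjk
              rw [List.getElem_set_ne (by omega)]
              exact hzero j (by simpa using hj) (by omega))]
      rw [take_succ_set _ _ _ (by omega), hdrop]
      simp only [List.map_cons, if_pos hc, List.append_assoc, List.singleton_append]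
    · rw [hget, if_neg hc]
      rw [hcast, ih (labels.length - (k+1)) (by omega) (k+1) rfl rs hlen
          (by intro j hj hjk; exact hzero j hj (by omega))]
      rw [hdrop]
      simp only [List.map_cons, if_neg hc]
      have : rs.take (k + 1) = rs.take k ++ [(0 : Int)] := by
        rw [List.take_add_one]
        have hk' : k < rs.length := by omega
        rw [List.getElem?_eq_getElem hk', hzero k hk' le_rfl]
        rfl
      rw [this]
      simp
  · have hemp : PySem.List.pyRange (k : Int) (labels.length : Int) 1 = [] := by
      rw [List.eq_nil_iff_forall_not_mem]
      intro x hx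
      rw [PySem.List.mem_pyRange_one] at hx
      omega
    rw [hemp, List.foldl_nil, List.drop_eq_nil_of_le (by omega), List.map_nil,
      List.append_nil, List.take_of_length_le (by omega)]

-- inner write loop: length

lemma inner_len (ps : List Int) (v : Int) (rs : List Int) :
    (ps.foldl (fun rs i => rs.set i.toNat v) rs).length = rs.length := by
  induction ps generalizing rs with
  | nil => rfl
  | cons p ps ih => simp [List.foldl_cons, ih]

-- inner write loop: elementwise

lemma inner_elem (ps : List Int) (hps : ∀ p ∈ ps, 0 ≤ p) (v : Int) (rs : List Int) (j : Nat) :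
    (ps.foldl (fun rs i => rs.set i.toNat v) rs)[j]?
      = if (j : Int) ∈ ps ∧ j < rs.length then some v else rs[j]? := by
  induction ps generalizing rs with
  | nil => simp
  | cons p ps ih =>
    have hp0 : (0:Int) ≤ p := hps p List.mem_cons_self
    rw [List.foldl_cons, ih (fun q hq => hps q (List.mem_cons_of_mem _ hq)) (rs.set p.toNat v),
        List.length_set, List.getElem?_set]
    by_cases hlt : j < rs.length
    · by_cases hmem : (j : Int) ∈ ps
      · simp [hmem, hlt]
      · by_cases hpj : p = (j : Int)
        · have h1 : p.toNat = j := by omega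
          simp [hmem, hlt, hpj]
        · have h1 : p.toNat ≠ j := by omega
          simp [hmem, hlt, h1]
          intro h; exact absurd h.symm hpj
    · have hn : rs[j]? = none := List.getElem?_eq_none (by omega)
      simp only [hlt, and_false, if_false]
      split_ifs with h1 h2
      · omega
      · exact hn.symm
      · rfl

lemma idx_getD (labels : List String) (lab : String) :
    ((PySem.List.enumerate labels 0).foldl
        (fun d p => d.modify p.2 [] (· ++ [p.1])) PySem.Dict.empty).getD lab []
      = ((PySem.List.enumerate labels 0).filter (fun p => p.2 == lab)).map (·.1) := by
  have h : (PySem.List.enumerate labels 0).foldl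
        (fun d p => d.modify p.2 [] (· ++ [p.1])) (PySem.Dict.empty : PySem.Dict String (List Int))
      = ((PySem.List.enumerate labels 0).map (fun p => (p.2, p.1))).foldl
        (fun d p => d.modify p.1 [] (· ++ [p.2])) PySem.Dict.empty := by
    rw [List.foldl_map]
  rw [h, PySem.Dict.getD_foldl_modify_append]
  rw [PySem.Dict.getD_empty, List.filter_map, List.map_map]
  simp [Function.comp_def]

lemma idx_mem (labels : List String) (lab : String) (j : Nat) :
    ((j : Int) ∈ ((PySem.List.enumerate labels 0).foldl
        (fun d p => d.modify p.2 [] (· ++ [p.1])) PySem.Dict.empty).getD lab [])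
      ↔ labels[j]? = some lab := by
  rw [idx_getD]
  simp only [List.mem_map, List.mem_filter]
  constructor
  · rintro ⟨p, ⟨hp, hlab⟩, hfst⟩
    obtain ⟨k, hk, rfl⟩ := (PySem.List.mem_enumerate_iff _ _ _).mp hp
    simp only [beq_iff_eq] at hlab
    have : k = j := by simp at hfst; omega
    subst this
    rw [List.getElem?_eq_getElem hk, hlab]
  · intro h
    have hj : j < labels.length := by
      by_contra hge
      rw [List.getElem?_eq_none (by omega)] at h; simp at h
    refine ⟨((j : Int), labels[j]), ⟨?_, ?_⟩, rfl⟩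
    · exact (PySem.List.mem_enumerate_iff _ _ _).mpr ⟨j, hj, by simp⟩
    · rw [List.getElem?_eq_getElem hj] at h
      simp [Option.some_inj.mp h]

lemma idx_nonneg (labels : List String) (lab : String) :
    ∀ p ∈ ((PySem.List.enumerate labels 0).foldl
        (fun d p => d.modify p.2 [] (· ++ [p.1])) PySem.Dict.empty).getD lab [], (0:Int) ≤ p := by
  rw [idx_getD]
  intro p hp
  obtain ⟨q, hq, rfl⟩ := List.mem_map.mp hp
  obtain ⟨k, hk, rfl⟩ := (PySem.List.mem_enumerate_iff _ _ _).mp (List.mem_filter.mp hq).1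
  simp

lemma outer_len (idx : PySem.Dict String (List Int)) :
    ∀ (l : List (Int × String)) (st : PySem.Set String × List Int),
    (l.foldl
        (fun st q => if PySem.Set.contains st.1 q.2 then st
          else (PySem.Set.add st.1 q.2,
            (idx.getD q.2 []).foldl (fun rs i => rs.set i.toNat (q.1 + 1)) st.2))
        st).2.length = st.2.length := by
  intro l
  induction l with
  | nil => intro st; rfl
  | cons q l ih =>
    intro st
    rw [List.foldl_cons, ih]
    by_cases hc : PySem.Set.contains st.1 q.2
    · rw [if_pos hc]
    · rw [if_neg hc]
      exact inner_len _ _ _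

lemma outer_elem (labels : List String)
    (idx : PySem.Dict String (List Int))
    (hnn : ∀ lab, ∀ p ∈ idx.getD lab [], (0:Int) ≤ p)
    (hmem : ∀ lab (j : Nat), ((j : Int) ∈ idx.getD lab []) ↔ labels[j]? = some lab)
    (j : Nat) (hj : j < labels.length) :
    ∀ (l : List String) (s : Int) (seen : PySem.Set String) (rs : List Int),
      rs.length = labels.length →
    (((PySem.List.enumerate l s).reverse).foldl
        (fun st q => if PySem.Set.contains st.1 q.2 then st
          else (PySem.Set.add st.1 q.2,
            (idx.getD q.2 []).foldl (fun rs i => rs.set i.toNat (q.1 + 1)) st.2))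
        (seen, rs)).2[j]?
      = if labels[j]'hj ∈ seen then rs[j]?
        else match PySem.List.index? l.reverse (labels[j]'hj) with
          | some r => some (s + ((l.length - 1 - r : Nat) : Int) + 1)
          | none => rs[j]? := by
  intro l
  induction l using List.reverseRecOn with
  | nil =>
    intro s seen rs _
    simp only [PySem.List.enumerate_nil, List.reverse_nil, List.foldl_nil,
      List.reverse_nil, PySem.List.index?_eq_idxOf?]
    split_ifs <;> simp
  | append_singleton t x ih =>
    intro s seen rs hlen
    rw [PySem.List.enumerate_append, List.reverse_append]
    simp only [PySem.List.enumerate_cons, PySem.List.enumerate_nil, List.reverse_cons,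
      List.reverse_nil, List.nil_append, List.singleton_append, List.foldl_cons]
    rw [List.reverse_append]
    simp only [List.reverse_cons, List.reverse_nil, List.nil_append, List.singleton_append]
    by_cases hseenx : PySem.Set.contains seen x
    · rw [if_pos hseenx]
      rw [ih s seen rs hlen]
      have hxseen : x ∈ seen := by simpa [PySem.Set.contains] using hseenx
      by_cases hls : labels[j]'hj ∈ seen
      · rw [if_pos hls, if_pos hls]
      · rw [if_neg hls, if_neg hls]
        have hxj : labels[j]'hj ≠ x := fun h => hls (h ▸ hxseen)
        rw [PySem.List.index?_cons_of_ne _ (fun h => hxj h.symm)]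
        cases hidx : PySem.List.index? t.reverse (labels[j]'hj) with
        | none => simp
        | some r =>
          simp only [Option.map_some]
          simp only [List.length_append, List.length_singleton]
          congr 2
          omega
    · rw [if_neg hseenx]
      have hxseen : x ∉ seen := by simpa [PySem.Set.contains] using hseenx
      rw [ih s (PySem.Set.add seen x)
          ((idx.getD x []).foldl (fun rs i => rs.set i.toNat (s + (t.length : Int) + 1)) rs)
          (by rw [inner_len]; exact hlen)]
      rw [inner_elem _ (hnn x) _ _ j, hlen]
      by_cases hx : labels[j]'hj = x
      · have hls : labels[j]'hj ∈ PySem.Set.add seen x := by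
          rw [PySem.Set.mem_add]; exact Or.inr hx
        have hin : (j : Int) ∈ idx.getD x [] := by
          rw [hmem x j, List.getElem?_eq_getElem hj, hx]
        rw [if_pos hls, if_pos ⟨hin, hj⟩]
        rw [if_neg (show labels[j]'hj ∉ seen by rw [hx]; exact hxseen)]
        rw [hx, PySem.List.index?_cons_self]
        simp only [List.length_append, List.length_singleton]
        congr 2
      · have hnin : (j : Int) ∉ idx.getD x [] := by
          rw [hmem x j, List.getElem?_eq_getElem hj]
          intro h; exact hx (Option.some_inj.mp h)
        have hadd : (labels[j]'hj ∈ PySem.Set.add seen x) ↔ labels[j]'hj ∈ seen := by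
          rw [PySem.Set.mem_add]
          exact ⟨fun h => h.elim id (fun h => absurd h hx), Or.inl⟩
        rw [if_neg (show ¬((j:Int) ∈ idx.getD x [] ∧ j < labels.length) from fun h => hnin h.1)]
        simp only [hadd]
        by_cases hls : labels[j]'hj ∈ seen
        · rw [if_pos hls, if_pos hls]
        · rw [if_neg hls, if_neg hls]
          rw [PySem.List.index?_cons_of_ne _ (fun h => hx h.symm)]
          cases hidx : PySem.List.index? t.reverse (labels[j]'hj) with
          | none => simp
          | some r =>
            simp only [Option.map_some]
            simp only [List.length_append, List.length_singleton]
            congr 2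
            omega

-- the `lab in index` guard is redundant: an absent key has an empty slot list, and
-- the inner write loop over [] is the identity
lemma guard_eq (idx : PySem.Dict String (List Int)) :
    (fun (st : PySem.Set String × List Int) (q : Int × String) =>
      if PySem.Set.contains st.1 q.2 then st
      else
        let seen := PySem.Set.add st.1 q.2
        if idx.contains q.2 then
          (seen, (idx.getD q.2 []).foldl (fun rs i => rs.set i.toNat (q.1 + 1)) st.2)
        else (seen, st.2))
    = fun st q =>
        if PySem.Set.contains st.1 q.2 then st
        else (PySem.Set.add st.1 q.2,
          (idx.getD q.2 []).foldl (fun rs i => rs.set i.toNat (q.1 + 1)) st.2) := by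
  funext st q
  by_cases hs : PySem.Set.contains st.1 q.2
  · rw [if_pos hs, if_pos hs]
  · rw [if_neg hs, if_neg hs]
    simp only []
    by_cases hc : idx.contains q.2
    · rw [if_pos hc]
    · rw [if_neg hc, PySem.Dict.getD_of_not_contains idx [] (by simpa using hc)]
      rfl

-- ===== VERDICT (by name: the statement is the Claim_ definition above) =====
theorem rank_labels_spec : Claim_equal_rank_labels := by
  intro labels instance_labels placeholder _ _
  unfold Spec_rank_labels rank_labels rank_labels_alt
  have hA := loop_eq labels
    ((PySem.List.enumerate instance_labels 0).foldl (fun d p => d.insert p.2 (p.1 + 1)) PySem.Dict.empty)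
    0 (List.replicate labels.length 0) (by simp) (by intro j hj _; simp)
  simp only [Nat.cast_zero] at hA
  rw [hA]
  simp only [List.take_zero, List.drop_zero, List.nil_append]
  rw [guard_eq]
  apply List.ext_getElem?
  intro j
  by_cases hj : j < labels.length
  · rw [outer_elem labels _ (fun lab => idx_nonneg labels lab) (fun lab k => idx_mem labels lab k)
        j hj instance_labels 0 PySem.Set.empty (List.replicate labels.length 0) (by simp)]
    rw [if_neg (show labels[j]'hj ∉ (PySem.Set.empty : PySem.Set String) from List.not_mem_nil)]
    rw [List.getElem?_map, List.getElem?_eq_getElem hj]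
    have hg := dict_get_eq instance_labels 0 PySem.Dict.empty (labels[j])
    cases hidx : PySem.List.index? instance_labels.reverse (labels[j]) with
    | none =>
      rw [hidx] at hg
      simp only [PySem.Dict.get?_empty] at hg
      rw [List.getElem?_replicate_of_lt hj]
      simp only [Option.map_some]
      rw [PySem.Dict.contains_eq_isSome_get?, hg]
      simp
    | some r =>
      rw [hidx] at hg
      simp only [Option.map_some]
      rw [PySem.Dict.contains_eq_isSome_get?, PySem.Dict.getD_eq_get?_getD, hg]
      simp
  · rw [List.getElem?_eq_none (by simpa using (by omega : labels.length ≤ j)),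
       List.getElem?_eq_none]
    rw [outer_len]
    simp only [List.length_replicate]
    omega
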